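-- pv_equiv track=rewrite | github.com/MINO1752/complexity-of-lock-patterns | is_exist_P.py | is_exist_pattern
-- ===== SOURCE A (Python) =====
-- skip = {
--     (1, 3): 2, (1, 7): 4, (1, 9): 5, (2, 8): 5, (3, 7): 5,
--     (3, 9): 6, (4, 6): 5, (7, 9): 8
-- }
--
-- def is_exist_pattern(pattern):
--     # 모든 이웃하는 점들에 대해:
--     for i, point in enumerate(pattern[:-1]):  # 마지막 점은 이웃이 없으므로 제외
--         next_point = pattern[i + 1]
--
--         if (point, next_point) in skip:  # 만약 건너뛰기 경로를 사용한다면: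
--             required = skip[(point, next_point)]  # 건너뛰기 규칙에 해당하는 점
--             if required not in pattern[:i]:  # 만약 건너뛰기 규칙을 만족하지 못했다면:
--                 return False  # False를 반환
--         if (next_point, point) in skip:  # 만약 건너뛰기 경로를 사용한다면:
--             required = skip[(next_point, point)]  # 건너뛰기 규칙에 해당하는 점
--             if required not in pattern[:i]:  # 만약 건너뛰기 규칙을 만족하지 못했다면:
--                 return False  # False를 반환
--
--     # 모든 건너뛰기 규칙을 만족했으면 True 반환
--     return True
-- ===== SOURCE B (Python) =====
-- skip = {
--     (1, 3): 2, (1, 7): 4, (1, 9): 5, (2, 8): 5, (3, 7): 5,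
--     (3, 9): 6, (4, 6): 5, (7, 9): 8
-- }
--
-- def is_exist_pattern(pattern):
--     # Rule-centric check: for each skip rule, scan the pattern for any adjacency
--     # using that rule whose required middle point is not strictly before it.
--     for (a, b), r in skip.items():
--         for i in range(len(pattern) - 1):
--             if (pattern[i], pattern[i + 1]) in ((a, b), (b, a)) and r not in pattern[:i]:
--                 return False
--     return True
-- ===== Notes on version B (the rewrite author's own statement) =====
-- stated objective: alternative
-- what changed: A makes one forward pass over consecutive pattern pairs looking each pair up in the skip dict; B loops over the fixed rule set and, for each rule, scans the pattern for an adjacency matching it (in either order) whose required point is not strictly before it.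
import Mathlib
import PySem

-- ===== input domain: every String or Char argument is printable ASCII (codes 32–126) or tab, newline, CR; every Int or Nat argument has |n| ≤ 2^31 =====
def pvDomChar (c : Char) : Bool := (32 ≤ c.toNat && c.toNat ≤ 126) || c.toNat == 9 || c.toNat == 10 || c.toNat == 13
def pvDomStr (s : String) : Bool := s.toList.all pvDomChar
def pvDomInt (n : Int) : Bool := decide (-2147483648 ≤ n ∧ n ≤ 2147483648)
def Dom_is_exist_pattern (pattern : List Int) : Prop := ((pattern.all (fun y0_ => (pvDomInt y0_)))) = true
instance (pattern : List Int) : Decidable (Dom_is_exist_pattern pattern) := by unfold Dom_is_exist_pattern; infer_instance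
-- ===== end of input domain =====

-- B replaces A's single forward pass over consecutive pairs (dict lookup per pair) by an
-- outer loop over the fixed skip-rule set with an inner scan of the pattern per rule
-- (objective: alternative decomposition, same asymptotic cost).

-- ===== PORT A =====
-- the module-level 'skip' dict (shared constant table)
def skipDict : PySem.Dict (Int × Int) Int :=
  PySem.Dict.mk [((1,3),2),((1,7),4),((1,9),5),((2,8),5),((3,7),5),((3,9),6),((4,6),5),((7,9),8)]

-- one 'if key in skip: required = skip[key]; if required not in pattern[:i]: return False' step
def skipViol (pattern : List Int) (i : Int) (key : Int × Int) : Bool :=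
  match skipDict.get? key with
  | some required => !(PySem.List.slice pattern none (some i)).contains required
  | none => false

def aLoop (pattern : List Int) : List (Int × Int) → Bool
  | [] => true
  | (i, point) :: rest =>
    -- pattern[i + 1]; always in range since (i, point) enumerates pattern[:-1]
    let next_point := (PySem.List.pyGet? pattern (i + 1)).getD 0
    if skipViol pattern i (point, next_point) then false
    else if skipViol pattern i (next_point, point) then false
    else aLoop pattern rest

def is_exist_pattern (pattern : List Int) : Bool :=
  aLoop pattern (PySem.List.enumerate (PySem.List.slice pattern none (some (-1))))

-- ===== PORT B =====
-- inner loop: 'for i in range(len(pattern) - 1): …' for one rule ((a, b), r)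
def bInner (pattern : List Int) (a b r : Int) : List Int → Bool
  | [] => false
  | i :: rest =>
    let x := (PySem.List.pyGet? pattern i).getD 0
    let y := (PySem.List.pyGet? pattern (i + 1)).getD 0
    if ((x, y) = (a, b) ∨ (x, y) = (b, a)) ∧
        (PySem.List.slice pattern none (some i)).contains r = false then true
    else bInner pattern a b r rest

-- outer loop: 'for (a, b), r in skip.items(): …'
def bOuter (pattern : List Int) : List ((Int × Int) × Int) → Bool
  | [] => true
  | ((a, b), r) :: rest =>
    if bInner pattern a b r (PySem.List.pyRange 0 ((pattern.length : Int) - 1) 1) then false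
    else bOuter pattern rest

def is_exist_pattern_alt (pattern : List Int) : Bool :=
  bOuter pattern skipDict.items

-- ===== PRECONDITION & SPEC =====
def Spec_is_exist_pattern (pattern : List Int) (out : Bool) : Prop := out = is_exist_pattern_alt pattern
instance (pattern : List Int) (out : Bool) : Decidable (Spec_is_exist_pattern pattern out) := by unfold Spec_is_exist_pattern; infer_instance

-- ===== CLAIM (what is proved, stated in full; the proofs are below) =====
def Claim_equal_is_exist_pattern : Prop := ∀ (pattern : List Int), Dom_is_exist_pattern pattern → Spec_is_exist_pattern pattern (is_exist_pattern pattern)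

-- ===== LEMMAS AND PROOFS =====

-- 'A flags position i (with point p)'
def aBad (pattern : List Int) (i point : Int) : Bool :=
  let np := (PySem.List.pyGet? pattern (i + 1)).getD 0
  skipViol pattern i (point, np) || skipViol pattern i (np, point)

-- 'rule ((a,b),r) is violated at position i'
def bBad (pattern : List Int) (a b r : Int) (i : Int) : Bool :=
  let x := (PySem.List.pyGet? pattern i).getD 0
  let y := (PySem.List.pyGet? pattern (i + 1)).getD 0
  decide (((x, y) = (a, b) ∨ (x, y) = (b, a)) ∧
    (PySem.List.slice pattern none (some i)).contains r = false)

theorem aLoop_eq_all (pattern : List Int) (l : List (Int × Int)) :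
    aLoop pattern l = l.all (fun q => !aBad pattern q.1 q.2) := by
  induction l with
  | nil => rfl
  | cons q rest ih =>
    obtain ⟨i, p⟩ := q
    cases h1 : skipViol pattern i (p, (PySem.List.pyGet? pattern (i + 1)).getD 0) <;>
      cases h2 : skipViol pattern i ((PySem.List.pyGet? pattern (i + 1)).getD 0, p) <;>
      simp [aLoop, aBad, List.all_cons, h1, h2, ih]

theorem bInner_eq_any (pattern : List Int) (a b r : Int) (l : List Int) :
    bInner pattern a b r l = l.any (fun i => bBad pattern a b r i) := by
  induction l with
  | nil => rfl
  | cons i rest ih =>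
    simp only [bInner, List.any_cons]
    split_ifs with h
    · have hb : bBad pattern a b r i = true := by unfold bBad; exact decide_eq_true h
      simp [hb]
    · have hb : bBad pattern a b r i = false := by unfold bBad; exact decide_eq_false h
      simp [hb, ih]

theorem bOuter_eq_all (pattern : List Int) (l : List ((Int × Int) × Int)) :
    bOuter pattern l =
      l.all (fun q => !bInner pattern q.1.1 q.1.2 q.2
        (PySem.List.pyRange 0 ((pattern.length : Int) - 1) 1)) := by
  induction l with
  | nil => rfl
  | cons q rest ih =>
    obtain ⟨⟨a, b⟩, r⟩ := q
    simp only [bOuter, List.all_cons, ← ih]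
    split_ifs with h <;> simp [h]

theorem skipKeysNodup : skipDict.keys.Nodup := by decide

theorem skipViol_iff (pattern : List Int) (i : Int) (key : Int × Int) :
    skipViol pattern i key = true ↔
      ∃ r, ((key, r) ∈ skipDict.items ∧
        (PySem.List.slice pattern none (some i)).contains r = false) := by
  unfold skipViol
  constructor
  · intro h
    cases hg : skipDict.get? key with
    | none => rw [hg] at h; simp at h
    | some r =>
      rw [hg] at h
      exact ⟨r, PySem.Dict.mem_items_of_get?_eq_some _ hg, by simpa using h⟩
  · rintro ⟨r, hmem, hc⟩
    rw [PySem.Dict.get?_of_mem_items _ hmem skipKeysNodup]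
    simpa using hc

-- pointwise correspondence at one position
theorem point_iff (pattern : List Int) (i : Int) :
    aBad pattern i ((PySem.List.pyGet? pattern i).getD 0) = true ↔
      ∃ q ∈ skipDict.items, bBad pattern q.1.1 q.1.2 q.2 i = true := by
  simp only [aBad, bBad, Bool.or_eq_true, skipViol_iff, decide_eq_true_eq]
  set x := (PySem.List.pyGet? pattern i).getD 0 with hx
  set y := (PySem.List.pyGet? pattern (i + 1)).getD 0 with hy
  constructor
  · rintro (⟨r, hmem, hc⟩ | ⟨r, hmem, hc⟩)
    · exact ⟨((x, y), r), hmem, Or.inl rfl, hc⟩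
    · exact ⟨((y, x), r), hmem, Or.inr rfl, hc⟩
  · rintro ⟨⟨⟨a, b⟩, r⟩, hmem, (hxy | hxy), hc⟩
    · exact Or.inl ⟨r, by simpa [← Prod.mk.injEq x y a b] using hxy ▸ hmem, hc⟩
    · refine Or.inr ⟨r, ?_, hc⟩
      have h1 : x = b := (Prod.mk.injEq .. ▸ hxy).1
      have h2 : y = a := (Prod.mk.injEq .. ▸ hxy).2
      simpa [h1, h2] using hmem
  
theorem main_eq (pattern : List Int) :
    is_exist_pattern pattern = is_exist_pattern_alt pattern := by
  unfold is_exist_pattern is_exist_pattern_alt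
  rw [aLoop_eq_all, bOuter_eq_all]
  apply Bool.eq_iff_iff.mpr
  simp only [List.all_eq_true, bInner_eq_any, Bool.not_eq_eq_eq_not, Bool.not_true,
    List.any_eq_false, PySem.List.slice_to_neg_one]
  constructor
  · -- from A's per-position check to B's per-rule check
    intro hA q hq i hi
    rcases (PySem.List.mem_pyRange_one ..).mp hi with ⟨h0, hlt⟩
    obtain ⟨k, rfl⟩ := Int.eq_ofNat_of_zero_le h0
    by_contra hbad
    have hk : k < pattern.dropLast.length := by
      rw [List.length_dropLast]; omega
    have hA' : aBad pattern (k : Int) (pattern.dropLast[k]) = false :=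
      hA ((k : Int), pattern.dropLast[k])
        ((PySem.List.mem_enumerate_iff _ _ _).mpr ⟨k, hk, by simp⟩)
    have hb' : k < pattern.length := by rw [List.length_dropLast] at hk; omega
    have hpk : pattern.dropLast[k] = (PySem.List.pyGet? pattern (k : Int)).getD 0 := by
      rw [List.getElem_dropLast]
      simp [List.getElem?_eq_getElem hb']
    rw [hpk] at hA'
    have htrue := (point_iff pattern (k : Int)).mpr ⟨q, hq, hbad⟩
    rw [htrue] at hA'
    simp at hA'
  · -- from B's per-rule check to A's per-position check
    intro hB q hq
    rcases (PySem.List.mem_enumerate_iff _ _ _).mp hq with ⟨k, hk, rfl⟩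
    show aBad pattern ((0 : Int) + k) (pattern.dropLast[k]) = false
    rw [zero_add]
    by_contra hbad
    rw [Bool.not_eq_false] at hbad
    have hb' : k < pattern.length := by rw [List.length_dropLast] at hk; omega
    have hpk : pattern.dropLast[k] = (PySem.List.pyGet? pattern (k : Int)).getD 0 := by
      rw [List.getElem_dropLast]
      simp [List.getElem?_eq_getElem hb']
    rw [hpk] at hbad
    obtain ⟨q', hq', hbb⟩ := (point_iff pattern (k : Int)).mp hbad
    have hk' : k < pattern.length - 1 := by rw [List.length_dropLast] at hk; omega
    have := hB q' hq' (k : Int)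
      ((PySem.List.mem_pyRange_one ..).mpr ⟨by omega, by omega⟩)
    exact this hbb

-- ===== VERDICT (by name: the statement is the Claim_ definition above) =====
theorem is_exist_pattern_spec : Claim_equal_is_exist_pattern := by
  intro pattern _
  unfold Spec_is_exist_pattern
  exact main_eq pattern
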